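-- pv_equiv track=rewrite | github.com/jodander/smooth-binary-mechanism | mechanism_noise_generation.py | fixed_weight_iterator
-- ===== SOURCE A (Python) =====
-- def fixed_weight_iterator(weight, end=None):
--     '''Iterator for positive binary numbers of a given Hamming weight, in sorted order
--
--     Parameters:
--     weight: Hamming weight, a positive integer
--     end: only numbers up to end-1 are output (optional, default is None)
--
--     Returns:
--     An iterator object for the sequence
--     '''
--     assert(weight > 0)
--     x = (1<<weight) - 1 # smallest integer with the given Hamming weight
--     while (end is None) or (x < end):
--         yield x
--         xlsb = x & -x # xlsb = least significant bit of x
--         y = x + xlsb # replace righmost block of 1s in x with a 1 immediately to its left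
--         ylsb = y & -y # ylsb = least significant bit of y
--         x = y + ylsb//(2*xlsb) - 1 # update x to the next integer with the same Hamming weight
-- ===== SOURCE B (Python) =====
-- def fixed_weight_iterator(weight, end=None):
--     '''Iterator for positive binary numbers of a given Hamming weight, in sorted order.
--
--     Recursive decomposition by highest set bit: a weight-w number with highest
--     bit p is 2**p + m with m of weight w-1 below 2**p; groups are emitted for
--     p = weight-1, weight, ... so the output is globally ascending.
--     '''
--     assert(weight > 0)
--     if weight == 1:
--         p = 0
--         while end is None or (1 << p) < end:
--             yield 1 << p
--             p += 1
--     else: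
--         p = weight - 1
--         while end is None or (1 << p) < end:
--             top = 1 << p
--             for m in fixed_weight_iterator(weight - 1, top):
--                 if end is not None and top + m >= end:
--                     break
--                 yield top + m
--             p += 1
-- ===== Notes on version B (the rewrite author's own statement) =====
-- stated objective: alternative
-- what changed: Replaces Gosper's next-same-weight bit trick (x&-x carry/shift update) with a recursion on the Hamming weight that emits numbers grouped by their highest set bit (2^p + m for m of weight-1 below 2^p), which is globally ascending.
import Mathlib
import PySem

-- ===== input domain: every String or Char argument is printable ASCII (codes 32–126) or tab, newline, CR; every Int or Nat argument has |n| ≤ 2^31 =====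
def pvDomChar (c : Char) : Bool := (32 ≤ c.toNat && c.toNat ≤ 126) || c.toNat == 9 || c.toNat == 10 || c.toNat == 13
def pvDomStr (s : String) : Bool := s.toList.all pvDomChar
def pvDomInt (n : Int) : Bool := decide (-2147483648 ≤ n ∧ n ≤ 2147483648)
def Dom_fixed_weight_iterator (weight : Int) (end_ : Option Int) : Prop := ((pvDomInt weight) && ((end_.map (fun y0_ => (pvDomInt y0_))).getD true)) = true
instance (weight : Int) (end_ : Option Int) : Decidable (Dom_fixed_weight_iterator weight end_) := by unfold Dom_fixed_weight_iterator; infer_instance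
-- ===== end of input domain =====

-- B re-implements the iterator by recursion on the Hamming weight, grouping outputs by their
-- highest set bit (an alternative algorithm of similar cost; equivalence is about the list of
-- yielded values — both Pythons are generators).

-- ===== PORT A =====
-- one Gosper step: x & -x, y = x + xlsb, y & -y, y + ylsb//(2*xlsb) - 1
-- (Python's '&' on ints is two's-complement AND = Int.land; no '&&&' instance for Int here)
def pvAStep (x : Int) : Int :=
  let xlsb := Int.land x (-x)
  let y := x + xlsb
  let ylsb := Int.land y (-y)
  y + PySem.Int.floordiv ylsb (2 * xlsb) - 1

-- 'while (end is None or x < end): yield x; x = step x' for end = some e.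
-- The inner guard 'x < pvAStep x' only makes the recursion total: on the weight-w chain the
-- step is strictly increasing (proved below), so the guard is always taken under Pre_.
def pvALoop (e : Int) (x : Int) : List Int :=
  if h1 : x < e then
    x :: (if h2 : x < pvAStep x then pvALoop e (pvAStep x) else [])
  else []
termination_by (e - x).toNat
decreasing_by omega

def fixed_weight_iterator (weight : Int) (end_ : Option Int) : List Int :=
  match end_ with
  | none => []   -- end=None: Python returns an infinite iterator (no finite list); excluded by Pre_
  | some e => pvALoop e (((1 <<< weight.toNat : Nat) : Int) - 1)

-- ===== PORT B =====
-- weight == 1: 'while end is None or (1<<p) < end: yield 1<<p; p += 1' for end = some e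
def pvBPow (e : Int) (p : Nat) : List Int :=
  if h : ((1 <<< p : Nat) : Int) < e then ((1 <<< p : Nat) : Int) :: pvBPow e (p + 1) else []
termination_by (e - ((1 <<< p : Nat) : Int)).toNat
decreasing_by
  have h1 : (1 <<< p : Nat) = 2 ^ p := by rw [Nat.shiftLeft_eq, one_mul]
  have h2 : (1 <<< (p+1) : Nat) = 2 ^ p * 2 := by rw [Nat.shiftLeft_eq, one_mul, pow_succ]
  have hp : 0 < 2 ^ p := Nat.two_pow_pos p
  omega

-- the inner 'for m in rec(top): if top + m >= end: break; yield top + m'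
def pvBEmit (e : Int) (top : Int) : List Int → List Int
  | [] => []
  | m :: ms => if e ≤ top + m then [] else (top + m) :: pvBEmit e top ms

-- the outer 'p = weight-1; while (1<<p) < end: top = 1<<p; <emit group>; p += 1'
def pvBGroups (rec : Int → List Int) (e : Int) (p : Nat) : List Int :=
  if h : ((1 <<< p : Nat) : Int) < e then
    pvBEmit e (1 <<< p) (rec (1 <<< p)) ++ pvBGroups rec e (p + 1)
  else []
termination_by (e - ((1 <<< p : Nat) : Int)).toNat
decreasing_by
  have h1 : (1 <<< p : Nat) = 2 ^ p := by rw [Nat.shiftLeft_eq, one_mul]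
  have h2 : (1 <<< (p+1) : Nat) = 2 ^ p * 2 := by rw [Nat.shiftLeft_eq, one_mul, pow_succ]
  have hp : 0 < 2 ^ p := Nat.two_pow_pos p
  omega

def pvBAux : Nat → Int → List Int
  | 0, _ => []                                    -- unreachable: Pre_ gives weight ≥ 1
  | 1, e => pvBPow e 0
  | (w+2), e => pvBGroups (pvBAux (w+1)) e (w+1)

def fixed_weight_iterator_alt (weight : Int) (end_ : Option Int) : List Int :=
  match end_ with
  | none => []   -- end=None: infinite iterator; excluded by Pre_
  | some e => pvBAux weight.toNat e

-- ===== PRECONDITION & SPEC =====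
-- Pre_ excludes weight ≤ 0, where Python's assert raises AssertionError, and end_=None, where
-- both Pythons return an INFINITE iterator (no finite list value exists to compare).
def Pre_fixed_weight_iterator (weight : Int) (end_ : Option Int) : Prop :=
  0 < weight ∧ end_.isSome = true
instance (weight : Int) (end_ : Option Int) : Decidable (Pre_fixed_weight_iterator weight end_) := by
  unfold Pre_fixed_weight_iterator; infer_instance

def pvWitness_fixed_weight_iterator : Int × Option Int := (2, some 10)

def Spec_fixed_weight_iterator (weight : Int) (end_ : Option Int) (out : List Int) : Prop := out = fixed_weight_iterator_alt weight end_
instance (weight : Int) (end_ : Option Int) (out : List Int) : Decidable (Spec_fixed_weight_iterator weight end_ out) := by unfold Spec_fixed_weight_iterator; infer_instance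

-- ===== CLAIM (what is proved, stated in full; the proofs are below) =====
def Claim_equal_fixed_weight_iterator : Prop := ∀ (weight : Int) (end_ : Option Int), Dom_fixed_weight_iterator weight end_ → Pre_fixed_weight_iterator weight end_ → Spec_fixed_weight_iterator weight end_ (fixed_weight_iterator weight end_)

-- ===== LEMMAS AND PROOFS =====

-- popcount (number of 1 bits) of a natural number
def pc (n : Nat) : Nat :=
  if h : n = 0 then 0 else n % 2 + pc (n / 2)
termination_by n
decreasing_by exact Nat.div_lt_self (Nat.pos_of_ne_zero h) one_lt_two

theorem pc_zero : pc 0 = 0 := by simp [pc]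

theorem pc_one : pc 1 = 1 := by rw [pc]; norm_num [pc_zero]

theorem pc_two_mul (n : Nat) : pc (2 * n) = pc n := by
  rcases Nat.eq_zero_or_pos n with h | h
  · subst h; simp [pc]
  · rw [pc, dif_neg (by omega)]
    have h1 : 2 * n % 2 = 0 := by omega
    have h2 : 2 * n / 2 = n := by omega
    rw [h1, h2, Nat.zero_add]

theorem pc_two_mul_add_one (n : Nat) : pc (2 * n + 1) = pc n + 1 := by
  rw [pc, dif_neg (by omega)]
  have h1 : (2 * n + 1) % 2 = 1 := by omega
  have h2 : (2 * n + 1) / 2 = n := by omega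
  rw [h1, h2]; omega

theorem pc_additive : ∀ (k m s : Nat), s < 2 ^ k → pc (m * 2 ^ k + s) = pc m + pc s := by
  intro k
  induction k with
  | zero =>
    intro m s hs
    have hs0 : s = 0 := by omega
    subst hs0; simp [pc_zero]
  | succ k IH =>
    intro m s hs
    have hpow : (2:Nat) ^ (k+1) = 2 * 2 ^ k := by rw [pow_succ]; ring
    have hdec : m * 2 ^ (k+1) + s = 2 * (m * 2 ^ k + s / 2) + s % 2 := by
      have hsd := Nat.div_add_mod s 2
      have : m * 2 ^ (k+1) = 2 * (m * 2 ^ k) := by rw [hpow]; ring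
      omega
    have hs2 : s / 2 < 2 ^ k := by omega
    rcases Nat.mod_two_eq_zero_or_one s with h | h
    · rw [hdec, h, Nat.add_zero, pc_two_mul, IH m (s / 2) hs2]
      have hse : s = 2 * (s / 2) := by omega
      conv_rhs => rw [hse, pc_two_mul]
    · rw [hdec, h, pc_two_mul_add_one, IH m (s / 2) hs2]
      have hse : s = 2 * (s / 2) + 1 := by omega
      conv_rhs => rw [hse, pc_two_mul_add_one]
      omega

theorem pc_two_pow (p : Nat) : pc (2 ^ p) = 1 := by
  have := pc_additive p 1 0 (Nat.two_pow_pos p)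
  simpa [pc_zero, pc_one] using this

theorem pc_two_pow_sub_one (k : Nat) : pc (2 ^ k - 1) = k := by
  induction k with
  | zero => simp [pc_zero]
  | succ k IH =>
    have hp := Nat.two_pow_pos k
    have h1 : 2 ^ (k+1) - 1 = 2 * (2 ^ k - 1) + 1 := by
      have : (2:Nat) ^ (k+1) = 2 * 2 ^ k := by rw [pow_succ]; ring
      omega
    rw [h1, pc_two_mul_add_one, IH]

theorem pc_pos (n : Nat) (h : n ≠ 0) : 0 < pc n := by
  revert h
  induction n using Nat.strong_induction_on with
  | _ n IH =>
    intro h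
    rw [pc, dif_neg h]
    rcases Nat.mod_two_eq_zero_or_one n with h2 | h2
    · have hn2 : n / 2 ≠ 0 := by omega
      have := IH (n / 2) (by omega) hn2
      omega
    · omega

theorem pc_min (n : Nat) : 2 ^ (pc n) - 1 ≤ n := by
  induction n using Nat.strong_induction_on with
  | _ n IH =>
    rcases Nat.eq_zero_or_pos n with h | h
    · subst h; simp [pc_zero]
    · rw [pc, dif_neg (by omega)]
      have hq := IH (n / 2) (by omega)
      rcases Nat.mod_two_eq_zero_or_one n with h2 | h2
      · rw [h2, Nat.zero_add]
        omega
      · rw [h2]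
        have hpow : (2:Nat) ^ (1 + pc (n / 2)) = 2 * 2 ^ (pc (n / 2)) := by
          rw [pow_add]; ring
        omega

theorem pc_odd (O : Nat) (h : O % 2 = 1) : pc O = pc (O - 1) + 1 := by
  obtain ⟨q, rfl⟩ : ∃ q, O = 2 * q + 1 := ⟨O / 2, by omega⟩
  rw [pc_two_mul_add_one]
  have h1 : 2 * q + 1 - 1 = 2 * q := by omega
  rw [h1, pc_two_mul]

-- ----- least-significant-bit computation: n & -n = 2^a for n = m * 2^a, m odd -----

theorem odd_testBit_pred (m j : Nat) (hm : m % 2 = 1) (hj : 1 ≤ j) :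
    m.testBit j = (m - 1).testBit j := by
  obtain ⟨j', rfl⟩ : ∃ j', j = j' + 1 := ⟨j - 1, by omega⟩
  rw [Nat.testBit_succ, Nat.testBit_succ]
  have : m / 2 = (m - 1) / 2 := by omega
  rw [this]

theorem ldiff_lsb (m a : Nat) (hm : m % 2 = 1) :
    Nat.ldiff (m * 2 ^ a) (m * 2 ^ a - 1) = 2 ^ a := by
  have hpa := Nat.two_pow_pos a
  have hrw : m * 2 ^ a - 1 = 2 ^ a * (m - 1) + (2 ^ a - 1) := by
    obtain ⟨m', rfl⟩ : ∃ m', m = m' + 1 := ⟨m - 1, by omega⟩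
    simp only [Nat.add_sub_cancel]
    rw [Nat.add_mul, one_mul, Nat.mul_comm (2 ^ a) m']
    omega
  apply Nat.eq_of_testBit_eq
  intro i
  rw [Nat.testBit_ldiff, Nat.testBit_two_pow, Nat.testBit_mul_two_pow,
      hrw, Nat.testBit_two_pow_mul_add (m - 1) (by omega) i]
  by_cases hia : i < a
  · simp [hia, show ¬ a ≤ i by omega, show ¬ a = i by omega]
  · have hai : a ≤ i := by omega
    rcases eq_or_lt_of_le hai with heq | hlt
    · subst heq
      simp only [if_neg (by omega : ¬ a < a), Nat.sub_self]
      have h1 : m.testBit 0 = true := by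
        rw [Nat.testBit_zero]; simp [hm]
      have h2 : (m - 1).testBit 0 = false := by
        rw [Nat.testBit_zero]; simp; omega
      simp [h1, h2]
    · have hj : 1 ≤ i - a := by omega
      rw [if_neg (by omega : ¬ i < a), ← odd_testBit_pred m (i - a) hm hj]
      simp [hai, show ¬ a = i by omega]

theorem land_lsb (m a : Nat) (hm : m % 2 = 1) :
    Int.land ((m * 2 ^ a : Nat) : Int) (-((m * 2 ^ a : Nat) : Int)) = ((2 ^ a : Nat) : Int) := by
  have hpos : 0 < m * 2 ^ a := Nat.mul_pos (by omega) (Nat.two_pow_pos a)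
  have hneg : (-((m * 2 ^ a : Nat) : Int)) = Int.negSucc (m * 2 ^ a - 1) := by
    rw [Int.negSucc_eq, Nat.cast_sub (by omega)]
    push_cast; ring
  rw [hneg]
  calc Int.land ((m * 2 ^ a : Nat) : Int) (Int.negSucc (m * 2 ^ a - 1))
      = ((Nat.ldiff (m * 2 ^ a) (m * 2 ^ a - 1) : Nat) : Int) := rfl
    _ = ((2 ^ a : Nat) : Int) := by rw [ldiff_lsb m a hm]

-- ----- evaluation of one Gosper step on the decomposition x = (O*2^K - 1) * 2^a, O odd, K ≥ 1 -----

theorem decomp (x : Nat) (hx : 0 < x) :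
    ∃ O K a, O % 2 = 1 ∧ 0 < K ∧ x = (O * 2 ^ K - 1) * 2 ^ a := by
  obtain ⟨a, m, hmo, hxe⟩ := Nat.exists_eq_two_pow_mul_odd (show x ≠ 0 by omega)
  have hm1 : m % 2 = 1 := Nat.odd_iff.mp hmo
  obtain ⟨K, O, hOo, hmo1⟩ := Nat.exists_eq_two_pow_mul_odd (show m + 1 ≠ 0 by omega)
  have hO1 : O % 2 = 1 := Nat.odd_iff.mp hOo
  rw [mul_comm] at hmo1
  have hK : 0 < K := by
    rcases Nat.eq_zero_or_pos K with h | h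
    · subst h; simp at hmo1; omega
    · exact h
  refine ⟨O, K, a, hO1, hK, ?_⟩
  have hmeq : m = O * 2 ^ K - 1 := by omega
  rw [hxe, hmeq]; ring

theorem two_le_OK (O K : Nat) (hO : O % 2 = 1) (hK : 0 < K) : 2 ≤ O * 2 ^ K := by
  have h1 : 2 ≤ 2 ^ K := by
    calc (2:Nat) = 2 ^ 1 := by norm_num
      _ ≤ 2 ^ K := Nat.pow_le_pow_right (by norm_num) hK
  calc 2 ≤ 2 ^ K := h1
    _ ≤ O * 2 ^ K := Nat.le_mul_of_pos_left _ (by omega)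

theorem M_odd (O K : Nat) (hO : O % 2 = 1) (hK : 0 < K) : (O * 2 ^ K - 1) % 2 = 1 := by
  have h2 : O * 2 ^ K = 2 * (O * 2 ^ (K - 1)) := by
    have hKK : K - 1 + 1 = K := by omega
    calc O * 2 ^ K = O * 2 ^ (K - 1 + 1) := by rw [hKK]
      _ = 2 * (O * 2 ^ (K - 1)) := by rw [pow_succ]; ring
  have := two_le_OK O K hO hK
  omega

theorem x_add (O K a : Nat) (hO : O % 2 = 1) (hK : 0 < K) :
    (O * 2 ^ K - 1) * 2 ^ a + 2 ^ a = O * 2 ^ (a + K) := by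
  have h1 : O * 2 ^ (a + K) = (O * 2 ^ K) * 2 ^ a := by rw [pow_add]; ring
  have h2 := two_le_OK O K hO hK
  have h3 : (O * 2 ^ K - 1) * 2 ^ a + 1 * 2 ^ a = (O * 2 ^ K) * 2 ^ a := by
    rw [← Nat.add_mul]; congr 1; omega
  omega

theorem block_add (K a : Nat) : (2 ^ K - 1) * 2 ^ a + 2 ^ a = 2 ^ (a + K) := by
  have h1 : (2:Nat) ^ (a + K) = 2 ^ K * 2 ^ a := by rw [pow_add]; ring
  have h2 := Nat.two_pow_pos K
  have h3 : (2 ^ K - 1) * 2 ^ a + 1 * 2 ^ a = 2 ^ K * 2 ^ a := by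
    rw [← Nat.add_mul]; congr 1; omega
  omega

theorem x_split (O K a : Nat) (hO : O % 2 = 1) (hK : 0 < K) :
    (O * 2 ^ K - 1) * 2 ^ a = (O - 1) * 2 ^ (a + K) + (2 ^ K - 1) * 2 ^ a := by
  have h1 := x_add O K a hO hK
  have h2 := block_add K a
  have h3 : (O - 1) * 2 ^ (a + K) + 1 * 2 ^ (a + K) = O * 2 ^ (a + K) := by
    rw [← Nat.add_mul]; congr 1; omega
  have h4 := Nat.two_pow_pos a
  omega

theorem astep_eval (O K a : Nat) (hO : O % 2 = 1) (hK : 0 < K) :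
    pvAStep (((O * 2 ^ K - 1) * 2 ^ a : Nat) : Int)
      = ((O * 2 ^ (a + K) + 2 ^ (K - 1) - 1 : Nat) : Int) := by
  have hModd := M_odd O K hO hK
  simp only [pvAStep]
  rw [land_lsb (O * 2 ^ K - 1) a hModd]
  have hy : ((((O * 2 ^ K - 1) * 2 ^ a : Nat)) : Int) + ((2 ^ a : Nat) : Int)
      = ((O * 2 ^ (a + K) : Nat) : Int) := by
    exact_mod_cast congrArg (fun n : Nat => (n : Int)) (x_add O K a hO hK)
  rw [hy, land_lsb O (a + K) hO]
  have h7 : (2 : Int) * ((2 ^ a : Nat) : Int) = ((2 ^ (a + 1) : Nat) : Int) := by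
    push_cast [pow_succ]; ring
  rw [h7, PySem.Int.floordiv_natCast]
  have h8 : 2 ^ (a + K) / 2 ^ (a + 1) = 2 ^ (K - 1) := by
    rw [Nat.pow_div (by omega) (by norm_num)]; congr 1; omega
  rw [h8]
  have h9 : 1 ≤ O * 2 ^ (a + K) + 2 ^ (K - 1) := by
    have := Nat.two_pow_pos (K - 1); omega
  rw [show ((O * 2 ^ (a + K) + 2 ^ (K - 1) - 1 : Nat) : Int)
        = ((O * 2 ^ (a + K) : Nat) : Int) + ((2 ^ (K - 1) : Nat) : Int) - 1 by
      rw [Nat.cast_sub h9]; push_cast; ring]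

theorem pc_decomp (O K a : Nat) (hO : O % 2 = 1) (hK : 0 < K) :
    pc ((O * 2 ^ K - 1) * 2 ^ a) = pc (O - 1) + K := by
  rw [x_split O K a hO hK]
  have hlt : (2 ^ K - 1) * 2 ^ a < 2 ^ (a + K) := by
    have := block_add K a
    have := Nat.two_pow_pos a
    omega
  rw [pc_additive (a + K) (O - 1) _ hlt]
  congr 1
  have h0 : (2 ^ K - 1) * 2 ^ a = (2 ^ K - 1) * 2 ^ a + 0 := by omega
  rw [h0, pc_additive a (2 ^ K - 1) 0 (Nat.two_pow_pos a), pc_zero, pc_two_pow_sub_one]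
  omega

theorem pc_next (O K a : Nat) (hO : O % 2 = 1) (hK : 0 < K) :
    pc (O * 2 ^ (a + K) + 2 ^ (K - 1) - 1) = pc (O - 1) + K := by
  have hp1 := Nat.two_pow_pos (K - 1)
  have heq : O * 2 ^ (a + K) + 2 ^ (K - 1) - 1 = O * 2 ^ (a + K) + (2 ^ (K - 1) - 1) := by omega
  have hlt : 2 ^ (K - 1) - 1 < 2 ^ (a + K) := by
    have : (2:Nat) ^ (K - 1) ≤ 2 ^ (a + K) := Nat.pow_le_pow_right (by norm_num) (by omega)
    omega
  rw [heq, pc_additive (a + K) O _ hlt, pc_two_pow_sub_one, pc_odd O hO]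
  omega

theorem next_gt (O K a : Nat) (hO : O % 2 = 1) (hK : 0 < K) :
    (O * 2 ^ K - 1) * 2 ^ a < O * 2 ^ (a + K) + 2 ^ (K - 1) - 1 := by
  have h1 := x_add O K a hO hK
  have h2 := Nat.two_pow_pos a
  have h3 := Nat.two_pow_pos (K - 1)
  omega

theorem next_min (O K a z : Nat) (hO : O % 2 = 1) (hK : 0 < K)
    (hz : (O * 2 ^ K - 1) * 2 ^ a < z) (hpc : pc z = pc (O - 1) + K) :
    O * 2 ^ (a + K) + 2 ^ (K - 1) - 1 ≤ z := by
  by_contra hcon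
  push_neg at hcon
  have hpa := Nat.two_pow_pos a
  have hpak := Nat.two_pow_pos (a + K)
  have hpk1 := Nat.two_pow_pos (K - 1)
  have hxadd := x_add O K a hO hK
  rcases Nat.lt_or_ge z (O * 2 ^ (a + K)) with hcase | hcase
  · have hsplit := x_split O K a hO hK
    have hOsub : (O - 1) * 2 ^ (a + K) + 1 * 2 ^ (a + K) = O * 2 ^ (a + K) := by
      rw [← Nat.add_mul]; congr 1; omega
    have hObound : (O - 1) * 2 ^ (a + K) ≤ z := by
      have hle : 2 ^ a ≤ 2 ^ (a + K) := Nat.pow_le_pow_right (by norm_num) (by omega)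
      omega
    have hrlt : z - (O - 1) * 2 ^ (a + K) < 2 ^ (a + K) := by omega
    have hpcz : pc z = pc (O - 1) + pc (z - (O - 1) * 2 ^ (a + K)) := by
      have h := pc_additive (a + K) (O - 1) (z - (O - 1) * 2 ^ (a + K)) (by omega)
      rw [show (O - 1) * 2 ^ (a + K) + (z - (O - 1) * 2 ^ (a + K)) = z by omega] at h
      exact h
    have hpcr : pc (z - (O - 1) * 2 ^ (a + K)) = K := by omega
    have hba := block_add K a
    have hrgt : (2 ^ K - 1) * 2 ^ a < z - (O - 1) * 2 ^ (a + K) := by omega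
    set r := z - (O - 1) * 2 ^ (a + K) with hr
    have hslt : r - (2 ^ K - 1) * 2 ^ a < 2 ^ a := by omega
    have hpcr2 : pc r = K + pc (r - (2 ^ K - 1) * 2 ^ a) := by
      have h := pc_additive a (2 ^ K - 1) (r - (2 ^ K - 1) * 2 ^ a) hslt
      rw [show (2 ^ K - 1) * 2 ^ a + (r - (2 ^ K - 1) * 2 ^ a) = r by omega] at h
      rw [h, pc_two_pow_sub_one]
    have hspos : r - (2 ^ K - 1) * 2 ^ a ≠ 0 := by omega
    have := pc_pos _ hspos
    omega
  · have htlt2 : z - O * 2 ^ (a + K) < 2 ^ (a + K) := by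
      have : (2:Nat) ^ (K - 1) ≤ 2 ^ (a + K) := Nat.pow_le_pow_right (by norm_num) (by omega)
      omega
    have hpcz : pc z = pc O + pc (z - O * 2 ^ (a + K)) := by
      have h := pc_additive (a + K) O (z - O * 2 ^ (a + K)) (by omega)
      rw [show O * 2 ^ (a + K) + (z - O * 2 ^ (a + K)) = z by omega] at h
      exact h
    have hOpc := pc_odd O hO
    have hpct : pc (z - O * 2 ^ (a + K)) = K - 1 := by omega
    have := pc_min (z - O * 2 ^ (a + K))
    rw [hpct] at this
    omega

-- ----- Int-cast helpers -----

theorem cast_lt_iff_lt_toNat (n : Nat) (e : Int) : ((n : Nat) : Int) < e ↔ n < e.toNat := by omega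

theorem toNat_sub_eq_zero_of_not_lt {n : Nat} {e : Int} (h : ¬ ((n : Nat) : Int) < e) :
    e.toNat - n = 0 := by omega

-- ----- generic filtered-range lemmas -----

theorem filter_range'_congr (p : Nat → Bool) (E : Nat) :
    ∀ (d lo mid : Nat), mid = lo + d → (∀ z, lo ≤ z → z < mid → p z = false) →
    (List.range' lo (E - lo)).filter p = (List.range' mid (E - mid)).filter p := by
  intro d
  induction d with
  | zero =>
    intro lo mid hmid _h
    have h : mid = lo := by omega
    subst h; rfl
  | succ d IH =>
    intro lo mid hmid h
    by_cases hloE : lo < E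
    · have h1 : E - lo = (E - (lo + 1)) + 1 := by omega
      rw [h1, List.range'_succ, List.filter_cons, if_neg (by simp [h lo le_rfl (by omega)])]
      exact IH (lo + 1) mid (by omega) (fun z hz1 hz2 => h z (by omega) hz2)
    · have h1 : E - lo = 0 := by omega
      have h2 : E - mid = 0 := by omega
      rw [h1, h2]
      rfl

theorem range'_filter_lt (E : Nat) :
    ∀ (n lo : Nat), List.range' lo (min E (lo + n) - lo) = (List.range' lo n).filter (fun z => decide (z < E)) := by
  intro n
  induction n with
  | zero =>
    intro lo
    have h : min E (lo + 0) - lo = 0 := by omega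
    rw [h]; rfl
  | succ n IH =>
    intro lo
    by_cases hlo : lo < E
    · have h1 : min E (lo + (n + 1)) - lo = (min E ((lo + 1) + n) - (lo + 1)) + 1 := by omega
      rw [h1, List.range'_succ, List.range'_succ, List.filter_cons, if_pos (by simp [hlo]), IH (lo + 1)]
    · have h1 : min E (lo + (n + 1)) - lo = 0 := by omega
      rw [h1]
      have h2 : (List.range' lo (n + 1)).filter (fun z => decide (z < E)) = [] := by
        rw [List.filter_eq_nil_iff]
        intro z hz
        rw [List.mem_range'] at hz
        obtain ⟨i, hi, rfl⟩ := hz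
        simp
        omega
      rw [h2]; rfl

-- ----- A's loop produces the filtered range -----

theorem aloop_eq (e : Int) (w : Nat) :
    ∀ (d x : Nat), e.toNat - x = d → 0 < x → pc x = w →
    pvALoop e (x : Int)
      = ((List.range' x (e.toNat - x)).filter (fun n => pc n == w)).map (fun n : Nat => (n : Int)) := by
  intro d
  induction d using Nat.strong_induction_on with
  | _ d IH =>
    intro x hd hx hpc
    by_cases hxe : (x : Int) < e
    · obtain ⟨O, K, a, hO, hK, hxeq⟩ := decomp x hx
      obtain ⟨x', hx'⟩ : ∃ v : Nat, v = O * 2 ^ (a + K) + 2 ^ (K - 1) - 1 := ⟨_, rfl⟩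
      have hstep : pvAStep (x : Int) = (x' : Int) := by
        rw [hxeq, hx']; exact astep_eval O K a hO hK
      have hlt : x < x' := by rw [hxeq, hx']; exact next_gt O K a hO hK
      have hw : w = pc (O - 1) + K := by rw [← hpc, hxeq, pc_decomp O K a hO hK]
      have hpc' : pc x' = w := by rw [hx', pc_next O K a hO hK, hw]
      have hE : x < e.toNat := by omega
      rw [pvALoop, dif_pos hxe, dif_pos (by rw [hstep]; exact_mod_cast hlt), hstep]
      have hrange : List.range' x (e.toNat - x) = x :: List.range' (x + 1) (e.toNat - (x + 1)) := by
        rw [show e.toNat - x = (e.toNat - (x + 1)) + 1 by omega, List.range'_succ]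
      rw [hrange, List.filter_cons, if_pos (by simp [hpc]), List.map_cons]
      congr 1
      have hcongr := filter_range'_congr (fun n => pc n == w) e.toNat (x' - (x + 1)) (x + 1) x' (by omega)
        (by
          intro z hz1 hz2
          simp only [beq_eq_false_iff_ne, ne_eq]
          intro hzw
          have hxz : (O * 2 ^ K - 1) * 2 ^ a < z := by rw [← hxeq]; omega
          have hmin := next_min O K a z hO hK hxz (by rw [hzw, hw])
          rw [← hx'] at hmin
          omega)
      rw [hcongr]
      exact IH (e.toNat - x') (by omega) x' rfl (by omega) hpc'
    · rw [pvALoop, dif_neg hxe]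
      have h0 : e.toNat - x = 0 := by omega
      rw [h0]; rfl

theorem A_eq (weight : Int) (hw : 0 < weight) (e : Int) :
    fixed_weight_iterator weight (some e)
      = ((List.range e.toNat).filter (fun n => pc n == weight.toNat)).map (fun n : Nat => (n : Int)) := by
  have hW1 : 1 ≤ weight.toNat := by omega
  have h2W : 2 ≤ 2 ^ weight.toNat := by
    calc (2:Nat) = 2 ^ 1 := by norm_num
      _ ≤ _ := Nat.pow_le_pow_right (by norm_num) hW1
  show pvALoop e (((1 <<< weight.toNat : Nat) : Int) - 1) = _
  have hx0 : ((1 <<< weight.toNat : Nat) : Int) - 1 = ((2 ^ weight.toNat - 1 : Nat) : Int) := by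
    rw [Nat.shiftLeft_eq, one_mul, Nat.cast_sub (by omega)]
    norm_num
  rw [hx0, aloop_eq e weight.toNat (e.toNat - (2 ^ weight.toNat - 1)) (2 ^ weight.toNat - 1) rfl
       (by omega) (pc_two_pow_sub_one weight.toNat)]
  rw [List.range_eq_range']
  have hcongr := filter_range'_congr (fun n => pc n == weight.toNat) e.toNat (2 ^ weight.toNat - 1) 0
      (2 ^ weight.toNat - 1) (by omega)
    (by
      intro z hz1 hz2
      simp only [beq_eq_false_iff_ne, ne_eq]
      intro hzw
      have := pc_min z
      rw [hzw] at this
      omega)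
  rw [Nat.sub_zero] at hcongr
  rw [← hcongr]

-- ----- B produces the filtered range -----

theorem bpow_eq (e : Int) :
    ∀ (d p : Nat), e.toNat - 2 ^ p = d →
    pvBPow e p = ((List.range' (2 ^ p) (e.toNat - 2 ^ p)).filter (fun n => pc n == 1)).map (fun n : Nat => (n : Int)) := by
  intro d
  induction d using Nat.strong_induction_on with
  | _ d IH =>
    intro p hd
    have hcast : ((1 <<< p : Nat) : Int) = ((2 ^ p : Nat) : Int) := by
      rw [Nat.shiftLeft_eq, one_mul]
    by_cases hpe : ((1 <<< p : Nat) : Int) < e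
    · have hpe' : ((2 ^ p : Nat) : Int) < e := by rwa [hcast] at hpe
      have hE : 2 ^ p < e.toNat := (cast_lt_iff_lt_toNat _ e).mp hpe'
      have hpp : 2 ^ (p + 1) = 2 ^ p + 2 ^ p := by rw [pow_succ]; omega
      have hp1 := Nat.two_pow_pos p
      rw [pvBPow, dif_pos hpe, hcast]
      have hrange : List.range' (2 ^ p) (e.toNat - 2 ^ p)
          = 2 ^ p :: List.range' (2 ^ p + 1) (e.toNat - (2 ^ p + 1)) := by
        rw [show e.toNat - 2 ^ p = (e.toNat - (2 ^ p + 1)) + 1 by omega, List.range'_succ]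
      rw [hrange, List.filter_cons, if_pos (by simp [pc_two_pow]), List.map_cons]
      congr 1
      have hcongr := filter_range'_congr (fun n => pc n == 1) e.toNat (2 ^ (p + 1) - (2 ^ p + 1))
          (2 ^ p + 1) (2 ^ (p + 1)) (by omega)
        (by
          intro z hz1 hz2
          simp only [beq_eq_false_iff_ne, ne_eq]
          intro hzw
          have hs : z - 2 ^ p < 2 ^ p := by omega
          have hadd := pc_additive p 1 (z - 2 ^ p) hs
          rw [one_mul, pc_one, show 2 ^ p + (z - 2 ^ p) = z by omega] at hadd
          have hpos := pc_pos (z - 2 ^ p) (by omega)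
          omega)
      rw [hcongr]
      exact IH (e.toNat - 2 ^ (p + 1)) (by have := Nat.two_pow_pos p; omega) (p + 1) rfl
    · rw [pvBPow, dif_neg hpe]
      have h0 : e.toNat - 2 ^ p = 0 := toNat_sub_eq_zero_of_not_lt (by rwa [hcast] at hpe)
      rw [h0]; rfl

theorem emit_eq (e top : Int) :
    ∀ (ns : List Nat), ns.Pairwise (· < ·) →
    pvBEmit e top (ns.map (fun n : Nat => (n : Int)))
      = ((ns.filter (fun m : Nat => decide (top + (m : Int) < e))).map (fun m : Nat => top + (m : Int))) := by
  intro ns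
  induction ns with
  | nil => intro _; rfl
  | cons m ms IH =>
    intro hpw
    rw [List.pairwise_cons] at hpw
    obtain ⟨hhead, htail⟩ := hpw
    rw [List.map_cons]
    by_cases hc : e ≤ top + (m : Int)
    · simp only [pvBEmit]
      rw [if_pos hc]
      have hfil : (m :: ms).filter (fun m' : Nat => decide (top + (m' : Int) < e)) = [] := by
        rw [List.filter_eq_nil_iff]
        intro z hz
        rcases List.mem_cons.mp hz with rfl | hz'
        · simp; omega
        · have hmz : ((m : Int)) ≤ (z : Int) := by
            exact_mod_cast Nat.le_of_lt (hhead z hz')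
          simp
          omega
      rw [hfil]; rfl
    · simp only [pvBEmit]
      rw [if_neg hc, List.filter_cons, if_pos (by simp; omega), List.map_cons]
      congr 1
      exact IH htail

theorem group_filter (w p : Nat) :
    (List.range' (2 ^ p) (2 ^ p)).filter (fun n => pc n == w + 1)
      = ((List.range (2 ^ p)).filter (fun n => pc n == w)).map (fun m => 2 ^ p + m) := by
  rw [List.range'_eq_map_range, List.filter_map]
  congr 1
  apply List.filter_congr
  intro x hx
  rw [List.mem_range] at hx
  have hadd := pc_additive p 1 x hx
  rw [one_mul, pc_one] at hadd
  simp only [Function.comp_apply]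
  rw [show pc (2 ^ p + x) = pc x + 1 by omega]
  rcases eq_or_ne (pc x) w with h | h
  · simp [h]
  · have h2 : pc x + 1 ≠ w + 1 := by omega
    simp [h, h2]

theorem groups_eq (w : Nat) (e : Int)
    (IH : ∀ e' : Int, pvBAux (w + 1) e' = ((List.range e'.toNat).filter (fun n => pc n == w + 1)).map (fun n : Nat => (n : Int))) :
    ∀ (d p : Nat), e.toNat - 2 ^ p = d →
    pvBGroups (pvBAux (w + 1)) e p
      = ((List.range' (2 ^ p) (e.toNat - 2 ^ p)).filter (fun n => pc n == w + 2)).map (fun n : Nat => (n : Int)) := by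
  intro d
  induction d using Nat.strong_induction_on with
  | _ d IHd =>
    intro p hd
    have hcast : ((1 <<< p : Nat) : Int) = ((2 ^ p : Nat) : Int) := by
      rw [Nat.shiftLeft_eq, one_mul]
    by_cases hpe : ((1 <<< p : Nat) : Int) < e
    · have hpe' : ((2 ^ p : Nat) : Int) < e := by rwa [hcast] at hpe
      have hE : 2 ^ p < e.toNat := (cast_lt_iff_lt_toNat _ e).mp hpe'
      have hpp : 2 ^ (p + 1) = 2 ^ p + 2 ^ p := by rw [pow_succ]; omega
      rw [pvBGroups, dif_pos hpe, hcast, IH ((2 ^ p : Nat) : Int), Int.toNat_natCast]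
      set ns := (List.range (2 ^ p)).filter (fun n => pc n == w + 1) with hns
      have hpw : ns.Pairwise (· < ·) := List.Pairwise.filter _ (List.pairwise_lt_range)
      rw [emit_eq e ((2 ^ p : Nat) : Int) ns hpw]
      have hfc : ns.filter (fun m : Nat => decide (((2 ^ p : Nat) : Int) + (m : Int) < e))
          = ns.filter (fun m : Nat => decide (2 ^ p + m < e.toNat)) := by
        apply List.filter_congr
        intro m _
        rw [decide_eq_decide, ← Nat.cast_add]
        exact cast_lt_iff_lt_toNat _ e
      rw [hfc]
      have hsplit : List.range' (2 ^ p) (e.toNat - 2 ^ p)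
          = List.range' (2 ^ p) (min e.toNat (2 ^ p + 2 ^ p) - 2 ^ p)
            ++ List.range' (2 ^ (p + 1)) (e.toNat - 2 ^ (p + 1)) := by
        rcases Nat.lt_or_ge e.toNat (2 ^ p + 2 ^ p) with hc | hc
        · have h1 : e.toNat - 2 ^ (p + 1) = 0 := by omega
          have h2 : min e.toNat (2 ^ p + 2 ^ p) - 2 ^ p = e.toNat - 2 ^ p := by omega
          rw [h1, h2]
          simp
        · have h1 : min e.toNat (2 ^ p + 2 ^ p) - 2 ^ p = 2 ^ p := by
            rw [min_eq_right hc]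
            exact Nat.add_sub_cancel (2 ^ p) (2 ^ p)
          rw [h1]
          have happ := List.range'_append (s := 2 ^ p) (m := 2 ^ p) (n := e.toNat - 2 ^ (p + 1)) (step := 1)
          rw [show 2 ^ p + 1 * 2 ^ p = 2 ^ (p + 1) by omega] at happ
          rw [show e.toNat - 2 ^ p = 2 ^ p + (e.toNat - 2 ^ (p + 1)) by omega]
          exact happ.symm
      rw [hsplit, List.filter_append, List.map_append]
      congr 1
      · rw [range'_filter_lt e.toNat (2 ^ p) (2 ^ p)]
        have hsw : (List.filter (fun n => pc n == w + 2) (List.filter (fun z => decide (z < e.toNat)) (List.range' (2 ^ p) (2 ^ p))))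
            = (List.filter (fun z => decide (z < e.toNat)) (List.filter (fun n => pc n == w + 2) (List.range' (2 ^ p) (2 ^ p)))) := by
          rw [List.filter_filter, List.filter_filter]
          exact List.filter_congr (fun x _ => Bool.and_comm _ _)
        rw [hsw, group_filter (w + 1) p, List.filter_map, List.map_map]
        have hl : (ns.filter (fun m : Nat => decide (2 ^ p + m < e.toNat)))
            = ns.filter ((fun z => decide (z < e.toNat)) ∘ (fun m : Nat => 2 ^ p + m)) := by
          apply List.filter_congr
          intro m _
          rfl
        rw [hl]
        apply List.map_congr_left
        intro m _
        simp only [Function.comp_apply]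
        push_cast
        ring
      · have hd2 : e.toNat - 2 ^ (p + 1) < d := by have := Nat.two_pow_pos p; omega
        exact IHd (e.toNat - 2 ^ (p + 1)) hd2 (p + 1) rfl
    · rw [pvBGroups, dif_neg hpe]
      have h0 : e.toNat - 2 ^ p = 0 := toNat_sub_eq_zero_of_not_lt (by rwa [hcast] at hpe)
      rw [h0]; rfl

theorem baux_eq : ∀ (w : Nat) (e : Int),
    pvBAux (w + 1) e = ((List.range e.toNat).filter (fun n => pc n == w + 1)).map (fun n : Nat => (n : Int)) := by
  intro w
  induction w with
  | zero =>
    intro e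
    show pvBPow e 0 = _
    rw [bpow_eq e (e.toNat - 2 ^ 0) 0 rfl, List.range_eq_range']
    have hcongr := filter_range'_congr (fun n => pc n == 1) e.toNat 1 0 1 (by omega)
      (by
        intro z hz1 hz2
        have hz : z = 0 := by omega
        subst hz
        simp [pc_zero])
    rw [Nat.sub_zero] at hcongr
    rw [pow_zero, ← hcongr]
  | succ w IHw =>
    intro e
    show pvBGroups (pvBAux (w + 1)) e (w + 1) = _
    rw [groups_eq w e IHw (e.toNat - 2 ^ (w + 1)) (w + 1) rfl, List.range_eq_range']
    have h2 : 2 ^ (w + 1) ≤ 2 ^ (w + 2) - 1 := by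
      have h3 : (2:Nat) ^ (w + 2) = 2 ^ (w + 1) * 2 := by rw [pow_succ]
      have := Nat.two_pow_pos (w + 1)
      omega
    have hcongr := filter_range'_congr (fun n => pc n == w + 2) e.toNat (2 ^ (w + 1)) 0 (2 ^ (w + 1)) (by omega)
      (by
        intro z hz1 hz2
        simp only [beq_eq_false_iff_ne, ne_eq]
        intro hzw
        have := pc_min z
        rw [hzw] at this
        omega)
    rw [Nat.sub_zero] at hcongr
    rw [← hcongr]

-- ===== VERDICT (by name: the statement is the Claim_ definition above) =====
theorem fixed_weight_iterator_spec : Claim_equal_fixed_weight_iterator := by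
  intro weight end_ _hdom hpre
  obtain ⟨hw, hsome⟩ := hpre
  unfold Spec_fixed_weight_iterator
  match end_, hsome with
  | some e, _ =>
    have hW : weight.toNat = (weight.toNat - 1) + 1 := by omega
    calc fixed_weight_iterator weight (some e)
        = ((List.range e.toNat).filter (fun n => pc n == weight.toNat)).map (fun n : Nat => (n : Int)) :=
          A_eq weight hw e
      _ = fixed_weight_iterator_alt weight (some e) := by
          show _ = pvBAux weight.toNat e
          rw [hW, baux_eq]
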